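-- pv_equiv track=rewrite | github.com/tanayvenkata/campaign-intel | scripts/preprocess_memos.py | parse_memo_structure
-- ===== SOURCE A (Python) =====
-- from typing import Dict, List, Optional, Tuple
--
-- def parse_memo_structure(lines: List[str]) -> List[Tuple[int, str, str, Optional[str], str]]:
--     """
--     Parse strategy memo into chunks based on section/subsection structure.
--
--     Returns list of:
--         (line_number, section, subsection, content)
--
--     Chunking rules:
--     1. Each ### subsection becomes a chunk
--     2. Content between ## and first ### (if any) becomes a chunk
--     3. Sections without ### subsections become single chunks
--     4. Tables are kept together with preceding text
--     """
--     chunks = []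
--     current_section = "Header"
--     current_subsection = None
--     current_content = []
--     chunk_start_line = 1
--
--     i = 0
--     while i < len(lines):
--         line = lines[i]
--         stripped = line.strip()
--
--         # Check for section header (##)
--         if stripped.startswith("## ") and not stripped.startswith("### "):
--             # Save previous chunk if has content
--             if current_content:
--                 content_text = "\n".join(current_content).strip()
--                 if content_text and not _is_only_separator(content_text):
--                     chunks.append((
--                         chunk_start_line,
--                         current_section,
--                         current_subsection,
--                         content_text
--                     ))
--
--             # Start new section
--             current_section = stripped[3:].strip()
--             current_subsection = None
--             current_content = []
--             chunk_start_line = i + 1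
--             i += 1
--             continue
--
--         # Check for subsection header (###)
--         if stripped.startswith("### "):
--             # Save previous chunk if has content
--             if current_content:
--                 content_text = "\n".join(current_content).strip()
--                 if content_text and not _is_only_separator(content_text):
--                     chunks.append((
--                         chunk_start_line,
--                         current_section,
--                         current_subsection,
--                         content_text
--                     ))
--
--             # Start new subsection
--             current_subsection = stripped[4:].strip()
--             current_content = []
--             chunk_start_line = i + 1
--             i += 1
--             continue
--
--         # Check for table - keep table together
--         if stripped.startswith("|") and "---" not in stripped:
--             # Collect entire table
--             table_lines = []
--             while i < len(lines) and lines[i].strip().startswith("|"):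
--                 table_lines.append(lines[i])
--                 i += 1
--             current_content.extend(table_lines)
--             continue
--
--         # Regular content
--         current_content.append(line)
--         i += 1
--
--     # Don't forget the last chunk
--     if current_content:
--         content_text = "\n".join(current_content).strip()
--         if content_text and not _is_only_separator(content_text):
--             chunks.append((
--                 chunk_start_line,
--                 current_section,
--                 current_subsection,
--                 content_text
--             ))
--
--     return chunks
--
-- def _is_only_separator(text: str) -> bool:
--     """Check if text is only separators (---)."""
--     return all(c in "-\n " for c in text)
-- ===== SOURCE B (Python) =====
-- from typing import List, Optional, Tuple
--
-- def _is_only_separator(text: str) -> bool: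
--     return all(c in "-\n " for c in text)
--
-- def parse_memo_structure(lines: List[str]) -> List[Tuple[int, str, Optional[str], str]]:
--     # Pass 1: group lines into segments delimited by ## / ### headers.
--     segments = [(1, "Header", None, [])]
--     for i, line in enumerate(lines):
--         s = line.strip()
--         if s.startswith("## ") and not s.startswith("### "):
--             segments.append((i + 1, s[3:].strip(), None, []))
--         elif s.startswith("### "):
--             segments.append((i + 1, segments[-1][1], s[4:].strip(), []))
--         else:
--             segments[-1][3].append(line)
--     # Pass 2: emit non-empty, non-separator segments.
--     out = []
--     for start, sec, sub, content in segments: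
--         text = "\n".join(content).strip()
--         if text and not _is_only_separator(text):
--             out.append((start, sec, sub, text))
--     return out
-- ===== Notes on version B (the rewrite author's own statement) =====
-- stated objective: simpler
-- what changed: Replaces A's single index-driven while-loop with an inner table-collection loop and three duplicated save-chunk blocks by two plain passes: one enumerate loop that groups lines into explicit segment records, then one loop that joins, strips and filters each segment; the redundant table loop (and its extra per-line strip/startswith work) disappears.
import Mathlib
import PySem

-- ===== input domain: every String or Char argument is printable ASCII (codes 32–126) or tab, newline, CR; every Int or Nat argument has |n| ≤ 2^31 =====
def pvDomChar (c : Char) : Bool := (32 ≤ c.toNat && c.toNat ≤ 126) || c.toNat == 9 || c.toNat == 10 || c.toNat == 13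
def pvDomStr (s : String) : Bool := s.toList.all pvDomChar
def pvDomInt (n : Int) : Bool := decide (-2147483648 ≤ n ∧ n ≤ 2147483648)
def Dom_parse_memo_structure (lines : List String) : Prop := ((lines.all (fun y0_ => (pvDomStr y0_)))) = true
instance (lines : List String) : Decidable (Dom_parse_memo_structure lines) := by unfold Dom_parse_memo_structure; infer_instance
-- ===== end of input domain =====

-- B re-groups the lines in two explicit passes (segment records, then emission) instead of A's
-- single while-loop with an inner table-collection loop; same return value, objective: simpler.

-- shared module helper ported unchanged: _is_only_separator
def is_only_separator (text : String) : Bool :=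
  text.toList.all (fun c => ("-\n ".toList).contains c)

-- ===== PORT A =====
-- A's while-loop: i advances by 1, except the table branch which swallows a maximal run of '|' lines.
def pvALoop (rest : List String) (i : Int) (sec : String) (sub : Option String)
    (content : List String) (start : Int)
    (acc : List (Int × String × Option String × String)) :
    List (Int × String × Option String × String) :=
  match rest with
  | [] =>
    if content ≠ [] then
      let text := PySem.Str.strip (PySem.Str.join "\n" content)
      if text ≠ "" ∧ is_only_separator text = false then acc ++ [(start, sec, sub, text)] else acc
    else acc
  | line :: rest' =>
    if PySem.Str.startswith (PySem.Str.strip line) "## "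
        && !PySem.Str.startswith (PySem.Str.strip line) "### " then
      pvALoop rest' (i + 1)
        (PySem.Str.strip (PySem.Str.slice (PySem.Str.strip line) (some 3) none)) none [] (i + 1)
        (if content ≠ [] then
          let text := PySem.Str.strip (PySem.Str.join "\n" content)
          if text ≠ "" ∧ is_only_separator text = false then acc ++ [(start, sec, sub, text)] else acc
        else acc)
    else if PySem.Str.startswith (PySem.Str.strip line) "### " then
      pvALoop rest' (i + 1) sec
        (some (PySem.Str.strip (PySem.Str.slice (PySem.Str.strip line) (some 4) none))) [] (i + 1)
        (if content ≠ [] then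
          let text := PySem.Str.strip (PySem.Str.join "\n" content)
          if text ≠ "" ∧ is_only_separator text = false then acc ++ [(start, sec, sub, text)] else acc
        else acc)
    else if h : PySem.Str.startswith (PySem.Str.strip line) "|"
        && !PySem.Str.isIn "---" (PySem.Str.strip line) then
      -- inner while: collect the maximal run of lines whose strip starts with '|'
      pvALoop ((line :: rest').dropWhile (fun l => PySem.Str.startswith (PySem.Str.strip l) "|"))
        (i + ((line :: rest').takeWhile (fun l => PySem.Str.startswith (PySem.Str.strip l) "|")).length)
        sec sub
        (content ++ (line :: rest').takeWhile (fun l => PySem.Str.startswith (PySem.Str.strip l) "|"))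
        start acc
    else
      pvALoop rest' (i + 1) sec sub (content ++ [line]) start acc
termination_by rest.length
decreasing_by
  · simp
  · simp
  · have hp : PySem.Str.startswith (PySem.Str.strip line) "|" = true := by
      rw [Bool.and_eq_true] at h; exact h.1
    rw [List.dropWhile_cons_of_pos (by simpa using hp)]
    exact Nat.lt_succ_of_le (List.length_dropWhile_le _ _)
  · simp

def parse_memo_structure (lines : List String) : List (Int × String × Option String × String) :=
  pvALoop lines 0 "Header" none [] 1 []

-- ===== PORT B =====
-- pass 1 of B: split the lines into segment records (start_line, section, subsection, content lines)
def pvSegs (lines : List String) (i : Int)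
    (cur : Int × String × Option String × List String) :
    List (Int × String × Option String × List String) :=
  match lines with
  | [] => [cur]
  | line :: rest =>
    if PySem.Str.startswith (PySem.Str.strip line) "## "
        && !PySem.Str.startswith (PySem.Str.strip line) "### " then
      cur :: pvSegs rest (i + 1)
        (i + 1, PySem.Str.strip (PySem.Str.slice (PySem.Str.strip line) (some 3) none), none, [])
    else if PySem.Str.startswith (PySem.Str.strip line) "### " then
      cur :: pvSegs rest (i + 1)
        (i + 1, cur.2.1, some (PySem.Str.strip (PySem.Str.slice (PySem.Str.strip line) (some 4) none)), [])
    else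
      pvSegs rest (i + 1) (cur.1, cur.2.1, cur.2.2.1, cur.2.2.2 ++ [line])

def parse_memo_structure_alt (lines : List String) : List (Int × String × Option String × String) :=
  -- pass 2 of B: emit the non-empty, non-separator segments
  (pvSegs lines 0 (1, "Header", none, [])).foldl
    (fun out seg =>
      let text := PySem.Str.strip (PySem.Str.join "\n" seg.2.2.2)
      if text ≠ "" ∧ is_only_separator text = false then
        out ++ [(seg.1, seg.2.1, seg.2.2.1, text)]
      else out) []

-- ===== PRECONDITION & SPEC =====
def Spec_parse_memo_structure (lines : List String) (out : List (Int × String × Option String × String)) : Prop := out = parse_memo_structure_alt lines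
instance (lines : List String) (out : List (Int × String × Option String × String)) : Decidable (Spec_parse_memo_structure lines out) := by unfold Spec_parse_memo_structure; infer_instance

-- ===== CLAIM (what is proved, stated in full; the proofs are below) =====
def Claim_equal_parse_memo_structure : Prop := ∀ (lines : List String), Dom_parse_memo_structure lines → Spec_parse_memo_structure lines (parse_memo_structure lines)

-- ===== LEMMAS AND PROOFS =====

-- what one segment contributes to the output
def pvEmitOne (seg : Int × String × Option String × List String) :
    List (Int × String × Option String × String) :=
  let text := PySem.Str.strip (PySem.Str.join "\n" seg.2.2.2)
  if text ≠ "" ∧ is_only_separator text = false then [(seg.1, seg.2.1, seg.2.2.1, text)] else []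

lemma pvSave_eq (start : Int) (sec : String) (sub : Option String) (content : List String)
    (acc : List (Int × String × Option String × String)) :
    (if content ≠ [] then
        let text := PySem.Str.strip (PySem.Str.join "\n" content)
        if text ≠ "" ∧ is_only_separator text = false then acc ++ [(start, sec, sub, text)] else acc
      else acc)
      = acc ++ pvEmitOne (start, sec, sub, content) := by
  by_cases hc : content = []
  · subst hc
    simp [pvEmitOne]
    decide
  · simp only [pvEmitOne, ne_eq, hc, not_false_eq_true, ite_true]
    split <;> simp

lemma pipe_not_header (s : String) (h : PySem.Str.startswith s "|" = true) :
    PySem.Str.startswith s "## " = false ∧ PySem.Str.startswith s "### " = false := by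
  rw [PySem.Str.startswith_eq] at h
  rw [PySem.Chars.startswith_iff] at h
  obtain ⟨t, ht⟩ := h
  constructor <;>
  · rw [PySem.Str.startswith_eq]
    rw [← Bool.not_eq_true, PySem.Chars.startswith_iff]
    intro hp
    rw [← ht] at hp
    simp [List.cons_prefix_cons] at hp

-- consuming a run of '|' lines segment-wise is just appending them to the current content
lemma pvSegs_table (tbl : List String)
    (h : ∀ l ∈ tbl, PySem.Str.startswith (PySem.Str.strip l) "|" = true) :
    ∀ (rest : List String) (i a : Int) (sec : String) (sub : Option String) (c : List String),
    pvSegs (tbl ++ rest) i (a, sec, sub, c)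
      = pvSegs rest (i + tbl.length) (a, sec, sub, c ++ tbl) := by
  induction tbl with
  | nil => intro rest i a sec sub c; simp
  | cons l tl ih =>
    intro rest i a sec sub c
    have hl := h l (List.mem_cons_self ..)
    have hnh := pipe_not_header _ hl
    rw [List.cons_append, pvSegs]
    simp only [hnh.1, hnh.2, Bool.false_and, Bool.false_eq_true, if_false]
    rw [ih (fun x hx => h x (List.mem_cons_of_mem _ hx)) rest (i + 1) a sec sub (c ++ [l])]
    congr 1
    · simp only [List.length_cons]; push_cast; omega
    · simp

set_option maxHeartbeats 1000000 in
lemma pvALoop_eq (n : Nat) :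
    ∀ (rest : List String), rest.length ≤ n →
    ∀ (i start : Int) (sec : String) (sub : Option String) (content : List String)
      (acc : List (Int × String × Option String × String)),
    pvALoop rest i sec sub content start acc
      = acc ++ (pvSegs rest i (start, sec, sub, content)).flatMap pvEmitOne := by
  induction n with
  | zero =>
    intro rest hr i start sec sub content acc
    have : rest = [] := List.eq_nil_of_length_eq_zero (Nat.le_zero.mp hr)
    subst this
    rw [pvALoop, pvSegs]
    simp only [List.flatMap_cons, List.flatMap_nil, List.append_nil]
    exact pvSave_eq ..
  | succ n ih =>
    intro rest hr i start sec sub content acc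
    match rest with
    | [] =>
      rw [pvALoop, pvSegs]
      simp only [List.flatMap_cons, List.flatMap_nil, List.append_nil]
      exact pvSave_eq ..
    | line :: rest' =>
      rw [pvALoop, pvSegs]
      by_cases h1 : (PySem.Str.startswith (PySem.Str.strip line) "## "
          && !PySem.Str.startswith (PySem.Str.strip line) "### ") = true
      · rw [if_pos h1, if_pos h1, pvSave_eq, ih rest' (by simpa using hr),
          List.flatMap_cons, ← List.append_assoc]
      · rw [Bool.not_eq_true] at h1
        simp only [h1, Bool.false_eq_true, if_false]
        by_cases h2 : PySem.Str.startswith (PySem.Str.strip line) "### " = true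
        · rw [if_pos h2, if_pos h2, pvSave_eq, ih rest' (by simpa using hr),
            List.flatMap_cons, ← List.append_assoc]
        · rw [Bool.not_eq_true] at h2
          simp only [h2, Bool.false_eq_true, if_false]
          by_cases h3 : (PySem.Str.startswith (PySem.Str.strip line) "|"
              && !PySem.Str.isIn "---" (PySem.Str.strip line)) = true
          · rw [dif_pos h3]
            have hp : PySem.Str.startswith (PySem.Str.strip line) "|" = true := by
              rw [Bool.and_eq_true] at h3; exact h3.1
            rw [List.takeWhile_cons_of_pos (by simpa using hp),
                List.dropWhile_cons_of_pos (by simpa using hp)]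
            rw [ih _ (Nat.le_trans (List.length_dropWhile_le _ _) (by simpa using hr))]
            have hsplit : rest'
                = rest'.takeWhile (fun l => PySem.Str.startswith (PySem.Str.strip l) "|")
                  ++ rest'.dropWhile (fun l => PySem.Str.startswith (PySem.Str.strip l) "|") :=
              (List.takeWhile_append_dropWhile ..).symm
            conv_rhs => rw [hsplit]
            rw [pvSegs_table
                (rest'.takeWhile (fun l => PySem.Str.startswith (PySem.Str.strip l) "|"))
                (fun l hl => List.mem_takeWhile_imp (p := fun l => PySem.Str.startswith (PySem.Str.strip l) "|") hl)
                (rest'.dropWhile (fun l => PySem.Str.startswith (PySem.Str.strip l) "|"))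
                (i + 1) start sec sub (content ++ [line])]
            have hidx : i + ((line :: rest'.takeWhile
                  (fun l => PySem.Str.startswith (PySem.Str.strip l) "|")).length : Int)
                = i + 1 + ((rest'.takeWhile
                  (fun l => PySem.Str.startswith (PySem.Str.strip l) "|")).length : Int) := by
              simp only [List.length_cons]; push_cast; ring
            have hcat : content ++ line :: rest'.takeWhile
                  (fun l => PySem.Str.startswith (PySem.Str.strip l) "|")
                = content ++ [line] ++ rest'.takeWhile
                  (fun l => PySem.Str.startswith (PySem.Str.strip l) "|") := by simp
            rw [hidx, hcat]
          · rw [Bool.not_eq_true] at h3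
            simp only [h3, Bool.false_eq_true, dite_false]
            rw [ih rest' (by simpa using hr)]

lemma parse_memo_structure_alt_eq (lines : List String) :
    parse_memo_structure_alt lines
      = (pvSegs lines 0 (1, "Header", none, [])).flatMap pvEmitOne := by
  unfold parse_memo_structure_alt
  have hf : (fun (out : List (Int × String × Option String × String)) seg =>
      let text := PySem.Str.strip (PySem.Str.join "\n" seg.2.2.2)
      if text ≠ "" ∧ is_only_separator text = false then
        out ++ [(seg.1, seg.2.1, seg.2.2.1, text)]
      else out) = fun out seg => out ++ pvEmitOne seg := by
    funext out seg
    simp only [pvEmitOne]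
    split <;> simp
  rw [hf, PySem.List.foldl_append_eq_flatMap]
  simp

-- ===== VERDICT (by name: the statement is the Claim_ definition above) =====
theorem parse_memo_structure_spec : Claim_equal_parse_memo_structure := by
  intro lines _
  unfold Spec_parse_memo_structure parse_memo_structure
  rw [parse_memo_structure_alt_eq, pvALoop_eq lines.length lines (le_refl _)]
  simp
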